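-- pv_equiv track=rewrite | github.com/VladAdeew/-1 | Сам6_2.py | tChanger
-- ===== SOURCE A (Python) =====
-- def tChanger(t):
--     if not isinstance(t, tuple):
--         return t
--     tList = list(list(t)[0])
--     tNumber = list(t)[1]
--     for i in tList:
--         if i == tNumber:
--             tList.remove(i)
--             break
--     return tuple(tList)
-- ===== SOURCE B (Python) =====
-- def tChanger(t):
--     if not isinstance(t, tuple):
--         return t
--     chars = list(t[0])
--     target = t[1]
--     try:
--         i = chars.index(target)
--         return tuple(chars[:i] + chars[i + 1:])
--     except ValueError:
--         return tuple(chars)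
-- ===== Notes on version B (the rewrite author's own statement) =====
-- stated objective: idiomatic
-- what changed: B replaces A's scan-then-list.remove (a second internal scan plus in-place mutation) with a single chars.index lookup and a sliced copy chars[:i]+chars[i+1:], no mutation.
import Mathlib
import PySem

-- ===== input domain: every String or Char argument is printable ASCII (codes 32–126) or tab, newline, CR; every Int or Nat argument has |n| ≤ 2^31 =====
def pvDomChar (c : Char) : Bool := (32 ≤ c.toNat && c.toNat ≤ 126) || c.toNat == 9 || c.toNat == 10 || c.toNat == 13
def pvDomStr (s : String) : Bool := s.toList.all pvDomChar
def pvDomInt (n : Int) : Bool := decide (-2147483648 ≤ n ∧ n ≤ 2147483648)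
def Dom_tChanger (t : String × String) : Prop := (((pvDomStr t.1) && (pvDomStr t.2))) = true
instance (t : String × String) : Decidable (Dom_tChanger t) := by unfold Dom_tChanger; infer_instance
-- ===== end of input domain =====

-- B removes the first matching character by index?+slices (one lookup, fresh sliced copy)
-- instead of A's for-loop + list.remove (scan then a second internal scan with in-place
-- mutation); same O(n) cost, return value proved equal on all inputs.

-- ===== PORT A =====
-- the for-loop: iterate over the snapshot `orig`; at the first i == tNumber, tList.remove(i)
-- then break.  remove? cur i removes the first occurrence of i from cur (some, since the
-- match was found while iterating cur = orig at that point).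
def tChangerLoop (orig cur : List String) (tNumber : String) : List String :=
  match orig with
  | [] => cur
  | i :: rest =>
    if i == tNumber then ((PySem.List.remove? cur i).getD cur)
    else tChangerLoop rest cur tNumber

def tChanger (t : String × String) : List String :=
  -- isinstance(t, tuple) is always true under the type convention
  let tList := t.1.toList.map (fun c => String.ofList [c])   -- list(t[0]): list of 1-char strings
  let tNumber := t.2                                     -- list(t)[1]
  tChangerLoop tList tList tNumber

-- ===== PORT B =====
def tChanger_alt (t : String × String) : List String :=
  let chars := t.1.toList.map (fun c => String.ofList [c])
  let target := t.2
  match PySem.List.index? chars target with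
  | some i => chars.take i ++ chars.drop (i + 1)  -- chars[:i] + chars[i+1:], i a valid index so plain take/drop is exact
  | none => chars                                 -- ValueError branch

-- ===== PRECONDITION & SPEC =====
def Spec_tChanger (t : String × String) (out : List String) : Prop := out = tChanger_alt t
instance (t : String × String) (out : List String) : Decidable (Spec_tChanger t out) := by unfold Spec_tChanger; infer_instance

-- ===== CLAIM (what is proved, stated in full; the proofs are below) =====
def Claim_equal_tChanger : Prop := ∀ (t : String × String), Dom_tChanger t → Spec_tChanger t (tChanger t)

-- ===== LEMMAS AND PROOFS =====

theorem tChangerLoop_cons_ne (orig cur : List String) (x n : String) (hx : ¬ x = n) :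
    tChangerLoop orig (x :: cur) n = x :: tChangerLoop orig cur n := by
  induction orig with
  | nil => rfl
  | cons i rest ih =>
    by_cases hi : i = n
    · subst hi
      have hxi : ¬ x = i := hx
      simp only [tChangerLoop, beq_self_eq_true, if_true,
        PySem.List.remove?_cons_of_ne cur hxi]
      cases h : PySem.List.remove? cur i <;> simp [h]
    · simp [tChangerLoop, hi, ih]

theorem tChangerLoop_eq_alt (xs : List String) (n : String) :
    tChangerLoop xs xs n =
      match PySem.List.index? xs n with
      | some i => xs.take i ++ xs.drop (i + 1)
      | none => xs := by
  induction xs with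
  | nil => rfl
  | cons x rest ih =>
    by_cases hx : x = n
    · subst hx
      rw [PySem.List.index?_cons_self]
      simp [tChangerLoop]
    · rw [show tChangerLoop (x :: rest) (x :: rest) n
            = tChangerLoop rest (x :: rest) n from by simp [tChangerLoop, hx],
          tChangerLoop_cons_ne rest rest x n hx, ih,
          PySem.List.index?_cons_of_ne rest hx]
      cases h : PySem.List.index? rest n <;> simp [h]

-- ===== VERDICT (by name: the statement is the Claim_ definition above) =====
theorem tChanger_spec : Claim_equal_tChanger := by
  intro t _
  unfold Spec_tChanger tChanger tChanger_alt
  exact tChangerLoop_eq_alt _ _
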